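-- pv_equiv track=rewrite | github.com/charleytrigano/location-vacances | send_messages_brevo.py | detecter_langue
-- ===== SOURCE A (Python) =====
-- def detecter_langue(pays):
--     """Détecte la langue depuis le pays"""
--     if not pays:
--         return 'fr'
--
--     pays_lower = pays.lower()
--
--     if any(k in pays_lower for k in ['royaume-uni', 'uk', 'united', 'états-unis', 'usa', 'canada', 'australia', 'ireland']):
--         return 'en'
--     elif any(k in pays_lower for k in ['espagne', 'spain', 'mexique', 'argentine', 'colombie']):
--         return 'es'
--     else:
--         return 'fr'
-- ===== SOURCE B (Python) =====
-- # Position-driven scan: one pass over positions of the lowercased string,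
-- # accumulating which languages have a keyword starting there; priority en > es > fr
-- # resolved afterwards (objective: alternative).
-- _TABLE = [
--     ("royaume-uni", "en"), ("uk", "en"), ("united", "en"), ("\u00e9tats-unis", "en"),
--     ("usa", "en"), ("canada", "en"), ("australia", "en"), ("ireland", "en"),
--     ("espagne", "es"), ("spain", "es"), ("mexique", "es"),
--     ("argentine", "es"), ("colombie", "es"),
-- ]
--
-- def detecter_langue(pays):
--     if not pays:
--         return 'fr'
--     s = pays.lower()
--     en = es = False
--     for i in range(len(s)):
--         for kw, code in _TABLE:
--             if s.startswith(kw, i):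
--                 if code == 'en':
--                     en = True
--                 else:
--                     es = True
--     if en:
--         return 'en'
--     if es:
--         return 'es'
--     return 'fr'
-- ===== Notes on version B (the rewrite author's own statement) =====
-- stated objective: alternative
-- what changed: Replaces the keyword-driven first-match any()-scans with a position-driven pass: one loop over the positions of the lowercased string testing which keywords start at each position, accumulating per-language boolean flags, then resolving the en > es > fr priority afterwards; correct because A's between-group order is exactly that priority.
import Mathlib
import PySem

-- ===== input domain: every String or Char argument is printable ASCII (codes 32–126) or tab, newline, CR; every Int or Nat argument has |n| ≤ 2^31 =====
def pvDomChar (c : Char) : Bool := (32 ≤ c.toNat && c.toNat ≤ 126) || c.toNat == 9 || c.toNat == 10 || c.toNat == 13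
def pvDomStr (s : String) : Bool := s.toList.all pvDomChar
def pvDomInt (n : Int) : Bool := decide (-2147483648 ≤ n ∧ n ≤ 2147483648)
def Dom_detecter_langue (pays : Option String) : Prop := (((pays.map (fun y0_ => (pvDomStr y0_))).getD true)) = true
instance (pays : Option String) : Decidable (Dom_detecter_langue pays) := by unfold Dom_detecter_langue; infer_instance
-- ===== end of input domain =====

-- B replaces A's keyword-driven first-match any()-scans with a position-driven pass
-- over the lowercased string accumulating per-language flags, resolving en > es > fr
-- afterwards (objective: alternative).


-- ===== PORT A =====
def detecter_langue (pays : Option String) : String :=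
  match pays with
  | none => "fr"                                       -- 'if not pays' (None)
  | some p =>
    if p = "" then "fr"                                -- 'if not pays' (empty string)
    else
      let pays_lower := PySem.Str.lower p
      if ["royaume-uni", "uk", "united", "états-unis", "usa", "canada", "australia",
          "ireland"].any (fun k => PySem.Str.isIn k pays_lower) then "en"
      else if ["espagne", "spain", "mexique", "argentine",
               "colombie"].any (fun k => PySem.Str.isIn k pays_lower) then "es"
      else "fr"

-- ===== PORT B =====
def pvLangTable : List (String × String) :=
  [("royaume-uni", "en"), ("uk", "en"), ("united", "en"), ("états-unis", "en"),
   ("usa", "en"), ("canada", "en"), ("australia", "en"), ("ireland", "en"),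
   ("espagne", "es"), ("spain", "es"), ("mexique", "es"),
   ("argentine", "es"), ("colombie", "es")]

-- the inner 'for kw, code in _TABLE' body at position i: s.startswith(kw, i) with
-- 0 ≤ i < len(s) is exactly 'kw is a prefix of s[i:]' (PySem.Chars.startswith on s.drop i)
def pvScanPos (s : List Char) (i : Nat) (acc : Bool × Bool) : Bool × Bool :=
  pvLangTable.foldl (fun a q =>
    if PySem.Chars.startswith (s.drop i) q.1.toList then
      (if q.2 = "en" then (true, a.2) else (a.1, true))
    else a) acc

def detecter_langue_alt (pays : Option String) : String :=
  match pays with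
  | none => "fr"
  | some p =>
    if p = "" then "fr"
    else
      let s := (PySem.Str.lower p).toList
      -- 'for i in range(len(s))' accumulating the flags (en, es)
      let r := (List.range s.length).foldl (fun acc i => pvScanPos s i acc) (false, false)
      if r.1 then "en" else if r.2 then "es" else "fr"

-- ===== PRECONDITION & SPEC =====
def Spec_detecter_langue (pays : Option String) (out : String) : Prop := out = detecter_langue_alt pays
instance (pays : Option String) (out : String) : Decidable (Spec_detecter_langue pays out) := by unfold Spec_detecter_langue; infer_instance

-- ===== CLAIM (what is proved, stated in full; the proofs are below) =====
def Claim_equal_detecter_langue : Prop := ∀ (pays : Option String), Dom_detecter_langue pays → Spec_detecter_langue pays (detecter_langue pays)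

-- ===== LEMMAS AND PROOFS =====

-- the inner table fold just ORs in 'some en keyword starts at i' / 'some es keyword starts at i'
theorem pvScanPos_eq (s : List Char) (i : Nat) (acc : Bool × Bool) :
    pvScanPos s i acc =
      (acc.1 || pvLangTable.any (fun q => PySem.Chars.startswith (s.drop i) q.1.toList && decide (q.2 = "en")),
       acc.2 || pvLangTable.any (fun q => PySem.Chars.startswith (s.drop i) q.1.toList && !decide (q.2 = "en"))) := by
  rw [pvScanPos]
  generalize pvLangTable = t
  induction t generalizing acc with
  | nil => simp
  | cons q t ih =>
    simp only [List.foldl_cons, List.any_cons, ih]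
    by_cases h1 : PySem.Chars.startswith (s.drop i) q.1.toList = true <;>
      by_cases h2 : q.2 = "en" <;>
      simp [h1, h2]


-- folding an OR-accumulating step over a list is 'any'
theorem pvFoldOr (l : List Nat) (f g : Nat → Bool) (acc : Bool × Bool) :
    l.foldl (fun a i => (a.1 || f i, a.2 || g i)) acc = (acc.1 || l.any f, acc.2 || l.any g) := by
  induction l generalizing acc with
  | nil => simp
  | cons i l ih => simp [ih, Bool.or_assoc]

-- two nested 'any's commute, the inner-independent conjunct staying with its element
theorem pvAnyComm {α β : Type} (l : List α) (m : List β) (f : α → β → Bool) (c : β → Bool) :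
    l.any (fun i => m.any (fun j => f i j && c j)) =
      m.any (fun j => l.any (fun i => f i j) && c j) := by
  rw [Bool.eq_iff_iff]
  simp only [List.any_eq_true, Bool.and_eq_true]
  tauto

-- 'kw starts at some position i < len(s)' is exactly 'kw in s', for nonempty kw
theorem pvAnyPos_eq_isIn (s kw : List Char) (hkw : kw ≠ []) :
    (List.range s.length).any (fun i => PySem.Chars.startswith (s.drop i) kw) =
      PySem.Chars.isIn kw s := by
  rw [Bool.eq_iff_iff, ← PySem.Chars.exists_prefix_drop_iff_isIn]
  simp only [List.any_eq_true, List.mem_range, PySem.Chars.startswith_iff]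
  constructor
  · rintro ⟨i, _, hp⟩; exact ⟨i, hp⟩
  · rintro ⟨j, hp⟩
    by_cases hj : j < s.length
    · exact ⟨j, hj, hp⟩
    · rw [List.drop_eq_nil_of_le (le_of_not_gt hj), List.prefix_nil] at hp
      exact absurd hp hkw

-- the table filtered to a language is that language's keyword list (b abstract)
theorem pvTable_en (b : String → Bool) :
    pvLangTable.any (fun q => b q.1 && (decide (q.2 = "en"))) =
      ["royaume-uni", "uk", "united", "états-unis", "usa", "canada", "australia",
       "ireland"].any b := by
  simp [pvLangTable]

theorem pvTable_es (b : String → Bool) :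
    pvLangTable.any (fun q => b q.1 && !decide (q.2 = "en")) =
      ["espagne", "spain", "mexique", "argentine", "colombie"].any b := by
  simp [pvLangTable]

-- 'any' respects pointwise equality on the list's members
theorem pvAnyCong {α : Type} (l : List α) (f g : α → Bool)
    (h : ∀ a ∈ l, f a = g a) : l.any f = l.any g := by
  induction l with
  | nil => rfl
  | cons a l ih =>
    simp only [List.any_cons, h a (List.mem_cons_self), ih (fun b hb => h b (List.mem_cons_of_mem _ hb))]

-- the accumulated flags equal A's two any()-tests
theorem pvFlags (s : List Char) :
    (List.range s.length).foldl (fun acc i => pvScanPos s i acc) (false, false) =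
      (["royaume-uni", "uk", "united", "états-unis", "usa", "canada", "australia",
        "ireland"].any (fun k => PySem.Chars.isIn k.toList s),
       ["espagne", "spain", "mexique", "argentine",
        "colombie"].any (fun k => PySem.Chars.isIn k.toList s)) := by
  have hstep : (fun (acc : Bool × Bool) (i : Nat) => pvScanPos s i acc) =
      (fun acc i =>
        (acc.1 || pvLangTable.any (fun q => PySem.Chars.startswith (s.drop i) q.1.toList && decide (q.2 = "en")),
         acc.2 || pvLangTable.any (fun q => PySem.Chars.startswith (s.drop i) q.1.toList && !decide (q.2 = "en")))) := by
    funext acc i; exact pvScanPos_eq s i acc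
  rw [hstep, pvFoldOr]
  simp only [Bool.false_or]
  rw [pvAnyComm, pvAnyComm]
  simp only [pvTable_en (fun k => (List.range s.length).any fun i => PySem.Chars.startswith (s.drop i) k.toList),
             pvTable_es (fun k => (List.range s.length).any fun i => PySem.Chars.startswith (s.drop i) k.toList)]
  congr 1 <;>
    refine pvAnyCong _ _ _ (fun k hk => ?_) <;>
    refine pvAnyPos_eq_isIn s k.toList ?_ <;>
    fin_cases hk <;> decide

-- ===== VERDICT (by name: the statement is the Claim_ definition above) =====
theorem detecter_langue_spec : Claim_equal_detecter_langue := by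
  intro pays _
  unfold Spec_detecter_langue detecter_langue detecter_langue_alt
  cases pays with
  | none => rfl
  | some p =>
    by_cases hp : p = ""
    · simp [hp]
    · simp only [hp, if_false, pvFlags]
      simp [PySem.Str.isIn]
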